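-- pv_equiv track=rewrite | github.com/ealruiz/calminispiral | LCurves_flagging_and_final_calibration.py | find_scan_boundaries
-- ===== SOURCE A (Python) =====
-- def find_scan_boundaries(times, gap_threshold):
-- 	scan_boundaries = []
-- 	current_start = times[0]
-- 	for i in range(1, len(times)):
-- 		time_diff = times[i] - times[i-1]
-- 		if time_diff > gap_threshold:
-- 			scan_boundaries.append((current_start, times[i-1]))
-- 			current_start = times[i]
-- 	scan_boundaries.append((current_start, times[-1])) # Add the last scan boundary
-- 	return scan_boundaries
-- ===== SOURCE B (Python) =====
-- def find_scan_boundaries(times, gap_threshold):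
-- 	n = len(times)
-- 	breaks = [i for i in range(1, n) if times[i] - times[i-1] > gap_threshold]
-- 	starts = [0] + breaks
-- 	ends = [b - 1 for b in breaks] + [n - 1]
-- 	return [(times[s], times[e]) for s, e in zip(starts, ends)]
-- ===== Notes on version B (the rewrite author's own statement) =====
-- stated objective: alternative
-- what changed: Replaces A's single accumulating pass (boundary list + current_start state) with a stateless two-phase shape: first collect the gap indices, then assemble the segment list by zipping start and end indices.
import Mathlib
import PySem

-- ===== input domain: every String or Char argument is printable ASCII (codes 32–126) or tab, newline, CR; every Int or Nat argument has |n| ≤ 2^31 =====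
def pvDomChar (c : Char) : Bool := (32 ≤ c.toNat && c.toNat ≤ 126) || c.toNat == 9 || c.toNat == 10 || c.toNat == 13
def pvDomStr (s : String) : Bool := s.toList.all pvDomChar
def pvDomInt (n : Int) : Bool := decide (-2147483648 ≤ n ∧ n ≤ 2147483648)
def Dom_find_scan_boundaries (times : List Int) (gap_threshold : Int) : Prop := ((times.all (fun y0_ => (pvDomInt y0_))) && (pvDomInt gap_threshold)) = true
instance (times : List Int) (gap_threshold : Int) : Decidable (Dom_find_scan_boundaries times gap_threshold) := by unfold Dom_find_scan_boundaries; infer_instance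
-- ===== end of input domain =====

-- B replaces A's accumulating single pass with a two-phase "find gap indices, then zip starts with ends" build (alternative decomposition, same O(n) cost).

-- ===== PORT A =====
-- literal port of A's loop: state = (scan_boundaries, current_start), iterated over range(1, len(times))
def find_scan_boundaries (times : List Int) (gap_threshold : Int) : List (Int × Int) :=
  let st := (PySem.List.pyRange 1 (PySem.List.len times) 1).foldl
    (fun (st : List (Int × Int) × Int) (i : Int) =>
      let time_diff := PySem.List.pyGetD times i 0 - PySem.List.pyGetD times (i-1) 0
      if time_diff > gap_threshold then
        (st.1 ++ [(st.2, PySem.List.pyGetD times (i-1) 0)], PySem.List.pyGetD times i 0)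
      else st)
    ([], PySem.List.pyGetD times 0 0)
  st.1 ++ [(st.2, PySem.List.pyGetD times (-1) 0)]

-- ===== PORT B =====
-- literal port of Source B: gap indices, starts = 0 :: breaks, ends = (breaks - 1) ++ [n-1], zip and read off times
def find_scan_boundaries_alt (times : List Int) (gap_threshold : Int) : List (Int × Int) :=
  let n := PySem.List.len times
  let breaks := (PySem.List.pyRange 1 n 1).filter
    (fun i => decide (PySem.List.pyGetD times i 0 - PySem.List.pyGetD times (i-1) 0 > gap_threshold))
  let starts := 0 :: breaks
  let ends := breaks.map (fun b => b - 1) ++ [n - 1]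
  (starts.zip ends).map (fun se => (PySem.List.pyGetD times se.1 0, PySem.List.pyGetD times se.2 0))

-- ===== PRECONDITION & SPEC =====
-- Pre_ excludes only the empty list, on which Python A raises IndexError (times[0]).
def Pre_find_scan_boundaries (times : List Int) (gap_threshold : Int) : Prop := times ≠ []
instance (times : List Int) (gap_threshold : Int) : Decidable (Pre_find_scan_boundaries times gap_threshold) := by unfold Pre_find_scan_boundaries; infer_instance

def pvWitness_find_scan_boundaries : List Int × Int := ([0, 1, 5, 6], 2)

def Spec_find_scan_boundaries (times : List Int) (gap_threshold : Int) (out : List (Int × Int)) : Prop := out = find_scan_boundaries_alt times gap_threshold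
instance (times : List Int) (gap_threshold : Int) (out : List (Int × Int)) : Decidable (Spec_find_scan_boundaries times gap_threshold out) := by unfold Spec_find_scan_boundaries; infer_instance

-- ===== CLAIM (what is proved, stated in full; the proofs are below) =====
def Claim_equal_find_scan_boundaries : Prop := ∀ (times : List Int) (gap_threshold : Int), Dom_find_scan_boundaries times gap_threshold → Pre_find_scan_boundaries times gap_threshold → Spec_find_scan_boundaries times gap_threshold (find_scan_boundaries times gap_threshold)

-- ===== LEMMAS AND PROOFS =====

-- the segment list both programs compute, parametrised by the start index and the break indices
def pvSeg (times : List Int) (s : Int) : List Int → List (Int × Int)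
  | [] => [(PySem.List.pyGetD times s 0, PySem.List.pyGetD times (-1) 0)]
  | b :: rest => (PySem.List.pyGetD times s 0, PySem.List.pyGetD times (b-1) 0) :: pvSeg times b rest

-- times[-1] = times[len(times)-1] on a nonempty list
lemma pv_last (times : List Int) (h : times ≠ []) :
    PySem.List.pyGetD times ((times.length : Int) - 1) 0 = PySem.List.pyGetD times (-1) 0 := by
  have hl : 0 < times.length := List.length_pos_iff.mpr h
  rw [PySem.List.pyGetD_neg_one times 0 h]
  have : (times.length : Int) - 1 = ((times.length - 1 : Nat) : Int) := by omega
  rw [this, PySem.List.pyGetD_natCast, List.getD_eq_getElem _ _ (by omega),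
      List.getLast_eq_getElem]

-- A's fold, started at any boundary prefix and any start index, produces pvSeg of the filtered indices
lemma pv_foldA (times : List Int) (gap_threshold : Int) (L : List Int) :
    ∀ (bs : List (Int × Int)) (s : Int),
    (let st := L.foldl
      (fun (st : List (Int × Int) × Int) (i : Int) =>
        let time_diff := PySem.List.pyGetD times i 0 - PySem.List.pyGetD times (i-1) 0
        if time_diff > gap_threshold then
          (st.1 ++ [(st.2, PySem.List.pyGetD times (i-1) 0)], PySem.List.pyGetD times i 0)
        else st)
      (bs, PySem.List.pyGetD times s 0)
     st.1 ++ [(st.2, PySem.List.pyGetD times (-1) 0)])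
    = bs ++ pvSeg times s (L.filter
        (fun i => decide (PySem.List.pyGetD times i 0 - PySem.List.pyGetD times (i-1) 0 > gap_threshold))) := by
  induction L with
  | nil => intro bs s; simp [pvSeg]
  | cons i L ih =>
    intro bs s
    by_cases hp : PySem.List.pyGetD times i 0 - PySem.List.pyGetD times (i-1) 0 > gap_threshold
    · simp only [List.foldl_cons, List.filter_cons, hp, if_pos, decide_true]
      have := ih (bs ++ [(PySem.List.pyGetD times s 0, PySem.List.pyGetD times (i-1) 0)]) i
      simp only [] at this ⊢
      rw [this]
      simp [pvSeg]
    · simp only [List.foldl_cons, List.filter_cons, hp, decide_false]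
      exact ih bs s

-- B's zip-map build produces the same pvSeg
lemma pv_zipB (times : List Int) (h : times ≠ []) (breaks : List Int) :
    ∀ (s : Int),
    ((s :: breaks).zip (breaks.map (fun b => b - 1) ++ [PySem.List.len times - 1])).map
      (fun se => (PySem.List.pyGetD times se.1 0, PySem.List.pyGetD times se.2 0))
    = pvSeg times s breaks := by
  induction breaks with
  | nil => intro s; simp [pvSeg, PySem.List.len_eq, pv_last times h]
  | cons b rest ih =>
    intro s
    simp only [List.map_cons, List.cons_append, List.zip_cons_cons, List.map_cons, pvSeg]
    exact congrArg _ (ih b)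

-- ===== VERDICT (by name: the statement is the Claim_ definition above) =====
theorem find_scan_boundaries_spec : Claim_equal_find_scan_boundaries := by
  intro times gap_threshold _ hpre
  unfold Spec_find_scan_boundaries find_scan_boundaries find_scan_boundaries_alt
  rw [pv_foldA times gap_threshold _ [] 0, ← pv_zipB times hpre _ 0]
  simp
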